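-- pv_equiv track=rewrite | github.com/goldmbappe/Freshman-Projects | calendars.py | toMiddle
-- ===== SOURCE A (Python) =====
-- def toMiddle(year):
--     '''Converts a year we use today into a Middle Earth Year and Age'''
--     # This might be helpful...
--     ageLengths = [None, 590, 3441, 3021, 2000, 2000, 2000]
--     current_age = 7
--     middleYear = year - 1971
--     while middleYear < 0 and current_age > 1:
--         current_age -= 1
--         middleYear += ageLengths[current_age]
--     return (current_age, middleYear)
-- ===== SOURCE B (Python) =====
-- # Forward scan over a precomputed table of age start offsets instead of a backward decrementing loop.
-- _STARTS = [(7, 0), (6, 2000), (5, 4000), (4, 6000), (3, 9021), (2, 12462)]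
--
-- def toMiddle(year):
--     '''Converts a year we use today into a Middle Earth Year and Age'''
--     d = year - 1971
--     for age, off in _STARTS:
--         if d + off >= 0:
--             return (age, d + off)
--     return (1, d + 13052)
-- ===== Notes on version B (the rewrite author's own statement) =====
-- stated objective: simpler
-- what changed: Replaces the backward while-loop that decrements the age and accumulates age lengths with a single forward scan of a precomputed table of cumulative start offsets, returning at the first age whose offset makes the residual non-negative.
import Mathlib
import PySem

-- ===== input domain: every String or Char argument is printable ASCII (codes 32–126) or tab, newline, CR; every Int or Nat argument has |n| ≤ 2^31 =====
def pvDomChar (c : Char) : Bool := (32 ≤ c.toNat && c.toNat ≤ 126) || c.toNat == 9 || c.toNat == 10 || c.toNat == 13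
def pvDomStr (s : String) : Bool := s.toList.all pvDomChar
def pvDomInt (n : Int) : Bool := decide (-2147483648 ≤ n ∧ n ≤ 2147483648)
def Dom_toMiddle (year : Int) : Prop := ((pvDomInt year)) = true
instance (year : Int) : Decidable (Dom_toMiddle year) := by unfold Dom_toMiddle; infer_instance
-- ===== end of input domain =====

-- B replaces A's backward decrement-and-accumulate loop with one forward scan of a
-- precomputed table of cumulative age-start offsets (objective: simpler).

-- ===== PORT A =====
-- Python's ageLengths[0] is None and is never read (guard current_age > 1); we use 0 as placeholder.
def pvAgeLengths : List Int := [0, 590, 3441, 3021, 2000, 2000, 2000]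

-- the while loop; current_age is tracked as a Nat (it stays in 1..7), middleYear as Int
def pvLoopA : Nat → Int → Int × Int
  | age, m =>
    if h : m < 0 ∧ age > 1 then
      pvLoopA (age - 1) (m + pvAgeLengths.getD (age - 1) 0)
    else
      ((age : Int), m)
  termination_by age _ => age
  decreasing_by omega

def toMiddle (year : Int) : Int × Int := pvLoopA 7 (year - 1971)

-- ===== PORT B =====
def pvStarts : List (Int × Int) := [(7, 0), (6, 2000), (5, 4000), (4, 6000), (3, 9021), (2, 12462)]

def pvScanB (d : Int) : List (Int × Int) → Int × Int
  | [] => (1, d + 13052)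
  | (age, off) :: rest => if d + off ≥ 0 then (age, d + off) else pvScanB d rest

def toMiddle_alt (year : Int) : Int × Int := pvScanB (year - 1971) pvStarts

-- ===== PRECONDITION & SPEC =====
def Spec_toMiddle (year : Int) (out : Int × Int) : Prop := out = toMiddle_alt year
instance (year : Int) (out : Int × Int) : Decidable (Spec_toMiddle year out) := by unfold Spec_toMiddle; infer_instance

-- ===== CLAIM (what is proved, stated in full; the proofs are below) =====
def Claim_equal_toMiddle : Prop := ∀ (year : Int), Dom_toMiddle year → Spec_toMiddle year (toMiddle year)

-- ===== LEMMAS AND PROOFS =====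

-- ===== VERDICT (by name: the statement is the Claim_ definition above) =====
theorem toMiddle_spec : Claim_equal_toMiddle := by
  intro year _
  unfold Spec_toMiddle toMiddle toMiddle_alt
  rw [pvLoopA, pvLoopA, pvLoopA, pvLoopA, pvLoopA, pvLoopA, pvLoopA]
  simp only [pvAgeLengths, pvStarts, pvScanB]
  norm_num [List.getD]
  split_ifs <;> simp_all [Prod.ext_iff] <;> omega
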